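-- pv_equiv track=rewrite | github.com/yilmazeren0/load-balancing-algorithm | load_balancer.py | algo_weighted_rr
-- ===== SOURCE A (Python) =====
-- weights = {
--     'http://localhost:5004': 1,
--     'http://localhost:5005': 2,
--     'http://localhost:5006': 3
-- }
--
-- def algo_weighted_rr(cluster_workers, counter):
--     expanded = []
--     for w in cluster_workers:
--         w_val = weights.get(w, 1)
--         for _ in range(w_val):
--             expanded.append(w)
--
--     if not expanded:
--         return cluster_workers[0], counter
--
--     w = expanded[counter % len(expanded)]
--     return w, (counter + 1)
-- ===== SOURCE B (Python) =====
-- weights = {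
--     'http://localhost:5004': 1,
--     'http://localhost:5005': 2,
--     'http://localhost:5006': 3
-- }
--
-- def algo_weighted_rr(cluster_workers, counter):
--     total = sum(weights.get(w, 1) for w in cluster_workers)
--     idx = counter % total
--     cum = 0
--     for w in cluster_workers:
--         cum += weights.get(w, 1)
--         if idx < cum:
--             return w, counter + 1
-- ===== Notes on version B (the rewrite author's own statement) =====
-- stated objective: faster
-- what changed: B replaces A's materialized expanded repetition list (one copy of each worker per weight unit, then an index into it) by a single prefix-sum scan: total weight in one pass, idx = counter % total, then return the first worker whose running cumulative weight exceeds idx.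
import Mathlib
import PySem

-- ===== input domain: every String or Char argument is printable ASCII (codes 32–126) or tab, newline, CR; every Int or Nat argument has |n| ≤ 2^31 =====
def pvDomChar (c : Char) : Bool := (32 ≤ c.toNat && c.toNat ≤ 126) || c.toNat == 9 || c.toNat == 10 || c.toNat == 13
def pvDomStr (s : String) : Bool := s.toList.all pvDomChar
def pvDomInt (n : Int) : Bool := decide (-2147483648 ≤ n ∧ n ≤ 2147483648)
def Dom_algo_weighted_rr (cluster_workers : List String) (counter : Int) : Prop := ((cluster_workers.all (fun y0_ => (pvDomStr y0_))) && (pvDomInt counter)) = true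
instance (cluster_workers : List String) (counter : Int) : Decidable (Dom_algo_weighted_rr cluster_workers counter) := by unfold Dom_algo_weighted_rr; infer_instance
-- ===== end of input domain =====

-- B replaces A's materialized weight-expanded list by a single prefix-sum scan (O(n) time, O(1) space).

-- ===== PORT A =====
-- the module-level 'weights' dict (shared context of Source A and Source B)
def pvWeights : PySem.Dict String Int :=
  PySem.Dict.mk [("http://localhost:5004", 1), ("http://localhost:5005", 2), ("http://localhost:5006", 3)]

def algo_weighted_rr (cluster_workers : List String) (counter : Int) : String × Int :=
  let expanded : List String :=
    cluster_workers.foldl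
      (fun acc w =>
        (PySem.List.pyRange 0 (PySem.Dict.getD pvWeights w 1) 1).foldl
          (fun acc2 _ => acc2 ++ [w]) acc)
      []
  if expanded = [] then
    -- cluster_workers[0]: Python raises IndexError here (cluster_workers is then empty); excluded by Pre_
    (PySem.List.pyGetD cluster_workers 0 "", counter)
  else
    -- expanded[counter % len(expanded)]: index is always in range (mod of a positive length)
    (PySem.List.pyGetD expanded (PySem.Int.mod counter (expanded.length : Int)) "", counter + 1)

-- ===== PORT B =====
-- the for-loop with the running cumulative weight and early return
def pvBGo (counter idx : Int) : List String → Int → String × Int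
  | [], _ => ("", counter + 1)  -- loop falls through only when total = 0, excluded by Pre_
  | w :: rest, cum =>
    let cum' := cum + PySem.Dict.getD pvWeights w 1
    if idx < cum' then (w, counter + 1) else pvBGo counter idx rest cum'

def algo_weighted_rr_alt (cluster_workers : List String) (counter : Int) : String × Int :=
  let total : Int := cluster_workers.foldl (fun s w => s + PySem.Dict.getD pvWeights w 1) 0
  -- counter % total: Python raises ZeroDivisionError when total = 0 (empty list); excluded by Pre_
  let idx : Int := (PySem.Int.mod? counter total).getD 0
  pvBGo counter idx cluster_workers 0

-- ===== PRECONDITION & SPEC =====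
-- Pre_ excludes only the empty worker list, on which A raises IndexError and B raises ZeroDivisionError.
def Pre_algo_weighted_rr (cluster_workers : List String) (counter : Int) : Prop := cluster_workers ≠ []
instance (cluster_workers : List String) (counter : Int) : Decidable (Pre_algo_weighted_rr cluster_workers counter) := by unfold Pre_algo_weighted_rr; infer_instance

def pvWitness_algo_weighted_rr : List String × Int := (["http://localhost:5005", "x"], 7)

def Spec_algo_weighted_rr (cluster_workers : List String) (counter : Int) (out : String × Int) : Prop := out = algo_weighted_rr_alt cluster_workers counter
instance (cluster_workers : List String) (counter : Int) (out : String × Int) : Decidable (Spec_algo_weighted_rr cluster_workers counter out) := by unfold Spec_algo_weighted_rr; infer_instance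

-- ===== CLAIM (what is proved, stated in full; the proofs are below) =====
def Claim_equal_algo_weighted_rr : Prop := ∀ (cluster_workers : List String) (counter : Int), Dom_algo_weighted_rr cluster_workers counter → Pre_algo_weighted_rr cluster_workers counter → Spec_algo_weighted_rr cluster_workers counter (algo_weighted_rr cluster_workers counter)

-- ===== LEMMAS AND PROOFS =====

def pvWt (w : String) : Int := PySem.Dict.getD pvWeights w 1

def pvEx (l : List String) : List String := l.flatMap (fun w => List.replicate (pvWt w).toNat w)

lemma pvWt_pos (w : String) : 0 < pvWt w := by
  unfold pvWt pvWeights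
  simp only [PySem.Dict.getD, PySem.Dict.get?, List.find?]
  repeat' split <;> simp_all

lemma pv_foldl_app_const {a b : Type} (l : List a) (acc : List b) (w : b) :
    l.foldl (fun a _ => a ++ [w]) acc = acc ++ List.replicate l.length w := by
  induction l generalizing acc with
  | nil => simp
  | cons x xs ih => simp [List.foldl, ih, List.replicate_succ, List.append_assoc]

lemma pv_expanded_eq (l : List String) (acc : List String) :
    l.foldl (fun acc w =>
        (PySem.List.pyRange 0 (PySem.Dict.getD pvWeights w 1) 1).foldl
          (fun acc2 _ => acc2 ++ [w]) acc) acc = acc ++ pvEx l := by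
  induction l generalizing acc with
  | nil => simp [pvEx]
  | cons x xs ih =>
      simp only [List.foldl, ih, pvEx, List.flatMap_cons]
      rw [pv_foldl_app_const, PySem.List.length_pyRange_one]
      simp [pvWt, List.append_assoc]

lemma pv_len_ex (l : List String) : ((pvEx l).length : Int) = (l.map pvWt).sum := by
  induction l with
  | nil => simp [pvEx]
  | cons x xs ih =>
      have := pvWt_pos x
      simp only [pvEx, List.flatMap_cons, List.length_append, List.length_replicate,
        List.map_cons, List.sum_cons] at *
      push_cast
      omega

lemma pv_total_pos (l : List String) (h : l ≠ []) : 0 < (l.map pvWt).sum := by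
  cases l with
  | nil => simp at h
  | cons x xs =>
      have hx := pvWt_pos x
      have hge : 0 ≤ (xs.map pvWt).sum := by
        induction xs with
        | nil => simp
        | cons y ys ihy => have := pvWt_pos y; simp [List.sum_cons] at *; omega
      simp only [List.map_cons, List.sum_cons]; omega

lemma pv_main (counter : Int) (l : List String) (idx : Int) :
    ∀ cum : Int, cum ≤ idx → idx - cum < (l.map pvWt).sum →
    pvBGo counter idx l cum = (PySem.List.pyGetD (pvEx l) (idx - cum) "", counter + 1) := by
  induction l with
  | nil => intro cum h0 h1; simp at h1; omega
  | cons w rest ih =>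
      intro cum h0 h1
      have hw := pvWt_pos w
      have hlr := pv_len_ex rest
      simp only [List.map_cons, List.sum_cons] at h1
      simp only [pvBGo, pvEx, List.flatMap_cons]
      by_cases hlt : idx < cum + pvWt w
      · rw [if_pos (show idx < cum + pvWeights.getD w 1 from hlt)]
        rw [PySem.List.pyGetD_eq_getElem _ _ (by omega)
          (by simp only [List.length_append, List.length_replicate]
              have := pv_len_ex rest
              push_cast at *
              omega)]
        rw [List.getElem_append_left (by simp only [List.length_replicate]; omega)]
        simp
      · rw [not_lt] at hlt
        rw [if_neg (show ¬ idx < cum + pvWeights.getD w 1 from not_lt.mpr hlt)]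
        have hrec := ih (cum + pvWt w) (by omega) (by omega)
        rw [show cum + pvWeights.getD w 1 = cum + pvWt w from rfl, hrec]
        have hidx :
            PySem.List.pyGetD (pvEx rest) (idx - (cum + pvWt w)) "" =
            PySem.List.pyGetD (List.replicate (pvWt w).toNat w ++ pvEx rest) (idx - cum) "" := by
          rw [PySem.List.pyGetD_of_nonneg _ _ (by omega),
            PySem.List.pyGetD_of_nonneg _ _ (by omega)]
          simp only [List.getD_eq_getElem?_getD]
          rw [List.getElem?_append_right (by simp only [List.length_replicate]; omega)]
          congr 2
          simp only [List.length_replicate]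
          omega
        rw [hidx]; rfl

-- ===== VERDICT (by name: the statement is the Claim_ definition above) =====
theorem algo_weighted_rr_spec : Claim_equal_algo_weighted_rr := by
  intro cw counter _ hpre
  have htot : cw.foldl (fun s w => s + PySem.Dict.getD pvWeights w 1) 0 = (cw.map pvWt).sum := by
    simpa [pvWt] using PySem.List.foldl_add cw pvWt 0
  have hpos := pv_total_pos cw hpre
  have hlen := pv_len_ex cw
  have hne : ¬ pvEx cw = [] := by
    intro h; rw [h] at hlen; simp at hlen; omega
  unfold Spec_algo_weighted_rr algo_weighted_rr algo_weighted_rr_alt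
  simp only [pv_expanded_eq cw [], List.nil_append, htot]
  rw [if_neg hne]
  rw [show PySem.Int.mod? counter ((cw.map pvWt).sum) = some (PySem.Int.mod counter ((cw.map pvWt).sum)) from by
    simp [PySem.Int.mod?, PySem.Int.mod, hpos.ne.symm]]
  simp only [Option.getD_some]
  rw [pv_main counter cw _ 0 (PySem.Int.mod_nonneg counter hpos)
    (by simpa using PySem.Int.mod_lt counter hpos)]
  rw [hlen]
  simp
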